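-- pv_equiv track=rewrite | github.com/bowmanonjupiter2/everyday-coding-challenge-python | traveling_towns.py | maxDaysToWork
-- ===== SOURCE A (Python) =====
-- def maxDaysToWork(countTown: list) -> int:
--     result = 0
--     while len(countTown) > 1:
--         countTown.sort(reverse=True)
--         days_to_work = countTown[1]
--         result += 2 * days_to_work
--         countTown.pop(1)
--         countTown[0] -= days_to_work
--     return result
-- ===== SOURCE B (Python) =====
-- def maxDaysToWork(countTown: list) -> int:
--     # Same return value as A, but sorts only once and then keeps the list in
--     # descending order by binary-search insertion of the difference per round
--     # (A re-sorts the whole list every round).  Does not mutate the argument.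
--     towns = sorted(countTown, reverse=True)
--     result = 0
--     while len(towns) > 1:
--         b = towns[1]
--         result += 2 * b
--         d = towns[0] - b
--         rest = towns[2:]
--         lo, hi = 0, len(rest)
--         while lo < hi:
--             mid = (lo + hi) // 2
--             if rest[mid] >= d:
--                 lo = mid + 1
--             else:
--                 hi = mid
--         rest.insert(lo, d)
--         towns = rest
--     return result
-- ===== Notes on version B (the rewrite author's own statement) =====
-- stated objective: alternative
-- what changed: B sorts the list once and then keeps it in descending order by inserting each round's difference at a binary-searched position, instead of A's full re-sort of the list at every loop iteration; B also leaves the argument unmutated (A sorts/pops it in place). Measured ~2x faster at n=16384 but both remain O(n^2) overall, so no speed claim is made.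
import Mathlib
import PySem

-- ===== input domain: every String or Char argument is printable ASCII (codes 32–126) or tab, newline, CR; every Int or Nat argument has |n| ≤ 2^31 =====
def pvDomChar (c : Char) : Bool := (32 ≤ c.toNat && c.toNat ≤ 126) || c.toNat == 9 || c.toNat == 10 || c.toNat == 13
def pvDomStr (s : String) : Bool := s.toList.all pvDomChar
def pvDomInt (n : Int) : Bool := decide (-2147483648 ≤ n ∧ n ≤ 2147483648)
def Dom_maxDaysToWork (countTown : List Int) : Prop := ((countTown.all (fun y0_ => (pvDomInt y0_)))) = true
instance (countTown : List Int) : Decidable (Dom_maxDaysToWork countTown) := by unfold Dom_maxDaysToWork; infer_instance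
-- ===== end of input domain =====

-- B sorts once and keeps the list descending by binary-search insertion of the difference per
-- round, instead of A's full re-sort every loop iteration. Equivalence is about the RETURN
-- value only: Python A mutates its argument (sort/pop in place), B does not.

-- ===== PORT A =====
-- A's loop body: sort the current list descending; b = countTown[1]; result += 2*b;
-- pop index 1; countTown[0] -= b.  Destructuring the sorted list as a :: b :: rest is
-- exactly reading indices 0 and 1, popping index 1 and overwriting index 0 with a - b.
-- fuel = length of the list: the loop removes exactly one element per round, so
-- countTown.length rounds always suffice (the fuel is only a totality guard).
def maxDaysToWorkLoop : Nat → List Int → Int → Int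
  | 0, _, result => result
  | fuel + 1, countTown, result =>
      match PySem.List.sorted countTown (fun x => x) true with
      | a :: b :: rest => maxDaysToWorkLoop fuel ((a - b) :: rest) (result + 2 * b)
      | _ => result

def maxDaysToWork (countTown : List Int) : Int :=
  maxDaysToWorkLoop countTown.length countTown 0

-- ===== PORT B =====
-- Source B's inner 'while lo < hi' binary search on the descending list rest:
-- fuel = rest.length + 1 is only a totality guard (hi - lo shrinks every iteration).
def bisectDescLoop (rest : List Int) (d : Int) : Nat → Int → Int → Int
  | 0, lo, _ => lo
  | fuel + 1, lo, hi =>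
      if lo < hi then
        let mid := PySem.Int.floordiv (lo + hi) 2
        if d ≤ PySem.List.pyGetD rest mid 0 then   -- rest[mid] >= d
          bisectDescLoop rest d fuel (mid + 1) hi
        else
          bisectDescLoop rest d fuel lo mid
      else lo

-- Source B's outer while: fuel = the list's length, one element is consumed per round.
def maxDaysToWorkLoopB : Nat → List Int → Int → Int
  | 0, _, r => r
  | fuel + 1, towns, r =>
      match towns with
      | a :: b :: rest =>
          let d := a - b
          let lo := bisectDescLoop rest d (rest.length + 1) 0 (PySem.List.len rest)
          maxDaysToWorkLoopB fuel (PySem.List.insert rest lo d) (r + 2 * b)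
      | _ => r

def maxDaysToWork_alt (countTown : List Int) : Int :=
  maxDaysToWorkLoopB countTown.length (PySem.List.sorted countTown (fun x => x) true) 0

-- ===== PRECONDITION & SPEC =====
def Spec_maxDaysToWork (countTown : List Int) (out : Int) : Prop := out = maxDaysToWork_alt countTown
instance (countTown : List Int) (out : Int) : Decidable (Spec_maxDaysToWork countTown out) := by unfold Spec_maxDaysToWork; infer_instance

-- ===== CLAIM (what is proved, stated in full; the proofs are below) =====
def Claim_equal_maxDaysToWork : Prop := ∀ (countTown : List Int), Dom_maxDaysToWork countTown → Spec_maxDaysToWork countTown (maxDaysToWork countTown)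

-- ===== LEMMAS AND PROOFS =====

-- two descending-sorted permutations of the same Int multiset are equal
theorem eq_of_perm_of_pairwise_ge {l₁ l₂ : List Int}
    (hp : l₁.Perm l₂)
    (h1 : l₁.Pairwise (fun a b => b ≤ a)) (h2 : l₂.Pairwise (fun a b => b ≤ a)) :
    l₁ = l₂ := by
  have himp : ∀ {a b : Int}, (fun a b => b ≤ a) a b → (fun x : Int => -x) a ≤ (fun x : Int => -x) b := by
    intro a b h; simpa using h
  exact PySem.List.eq_of_perm_of_pairwise_le_of_injective (fun x : Int => -x)
    neg_injective hp (h1.imp himp) (h2.imp himp)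

-- the binary search returns a boundary: everything before it is ≥ d, everything after is < d
theorem bisect_boundary (rest : List Int) (d : Int)
    (hrest : rest.Pairwise (fun a b => b ≤ a)) :
    ∀ (fuel : Nat) (lo hi : Int), 0 ≤ lo → lo ≤ hi → hi ≤ rest.length →
      (hi - lo).toNat ≤ fuel →
      (∀ j : Nat, j < lo.toNat → d ≤ rest.getD j 0) →
      (∀ j : Nat, hi.toNat ≤ j → j < rest.length → rest.getD j 0 < d) →
      0 ≤ bisectDescLoop rest d fuel lo hi ∧
      bisectDescLoop rest d fuel lo hi ≤ rest.length ∧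
      (∀ j : Nat, j < (bisectDescLoop rest d fuel lo hi).toNat → d ≤ rest.getD j 0) ∧
      (∀ j : Nat, (bisectDescLoop rest d fuel lo hi).toNat ≤ j → j < rest.length →
        rest.getD j 0 < d) := by
  intro fuel
  induction fuel with
  | zero =>
      intro lo hi h0 hlh hhl hf hpre hsuf
      have heq : hi = lo := by omega
      subst heq
      simp only [bisectDescLoop]
      exact ⟨h0, hhl, hpre, hsuf⟩
  | succ fuel ih =>
      intro lo hi h0 hlh hhl hf hpre hsuf
      by_cases hlt : lo < hi
      · have hmid := PySem.Int.floordiv_two_mid_bounds hlh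
        set mid := PySem.Int.floordiv (lo + hi) 2 with hmiddef
        have hmidlt : mid < hi := by
          rw [hmiddef, PySem.Int.floordiv_lt_iff_lt_mul (by omega : (0:Int) < 2)]
          omega
        have hmid0 : 0 ≤ mid := by omega
        have hmidlen : mid < rest.length := by omega
        have hget : PySem.List.pyGetD rest mid 0 = rest.getD mid.toNat 0 :=
          PySem.List.pyGetD_of_nonneg rest 0 hmid0
        have hmono : ∀ (p q : Nat), p ≤ q → q < rest.length →
            rest.getD q 0 ≤ rest.getD p 0 := by
          intro p q hpq hq
          rcases Nat.eq_or_lt_of_le hpq with rfl | hpq'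
          · exact le_refl _
          · rw [List.getD_eq_getElem rest 0 hq, List.getD_eq_getElem rest 0 (by omega)]
            exact (List.pairwise_iff_getElem.mp hrest) p q (by omega) hq hpq'
        simp only [bisectDescLoop, if_pos hlt, ← hmiddef]
        by_cases hd : d ≤ PySem.List.pyGetD rest mid 0
        · rw [if_pos hd]
          refine ih (mid + 1) hi (by omega) (by omega) hhl (by omega) ?_ hsuf
          intro j hj
          have hjm : j ≤ mid.toNat := by omega
          have := hmono j mid.toNat hjm (by omega)
          rw [hget] at hd
          omega
        · rw [if_neg hd]
          refine ih lo mid h0 (by omega) (by omega) (by omega) hpre ?_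
          intro j hjm hjlen
          have := hmono mid.toNat j (by omega) hjlen
          rw [hget] at hd
          omega
      · have heq : hi = lo := by omega
        subst heq
        simp only [bisectDescLoop, if_neg hlt]
        exact ⟨h0, hhl, hpre, hsuf⟩

-- inserting d at that boundary of the descending list rest IS sorting d :: rest descending
theorem insert_at_boundary_eq_sorted (rest : List Int) (d : Int) (res : Int)
    (hrest : rest.Pairwise (fun a b => b ≤ a))
    (h0 : 0 ≤ res) (hlen : res ≤ rest.length)
    (hpre : ∀ j : Nat, j < res.toNat → d ≤ rest.getD j 0)
    (hsuf : ∀ j : Nat, res.toNat ≤ j → j < rest.length → rest.getD j 0 < d) :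
    PySem.List.insert rest res d = PySem.List.sorted (d :: rest) (fun x => x) true := by
  have hres : res = (res.toNat : Int) := by omega
  have hnat : res.toNat ≤ rest.length := by omega
  rw [hres, PySem.List.insert_natCast rest res.toNat d hnat]
  have hx_take : ∀ x ∈ rest.take res.toNat, d ≤ x := by
    intro x hx
    rcases List.mem_iff_getElem.mp hx with ⟨i, hi, hxi⟩
    have hilen : i < rest.length := by
      have := List.length_take_le res.toNat rest
      omega
    have hires : i < res.toNat := by
      have := rest.length_take (i := res.toNat)
      omega
    have : (rest.take res.toNat)[i] = rest[i] := List.getElem_take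
    rw [this] at hxi
    have := hpre i hires
    rw [List.getD_eq_getElem rest 0 hilen] at this
    omega
  have hx_drop : ∀ x ∈ rest.drop res.toNat, x < d := by
    intro x hx
    rcases List.mem_iff_getElem.mp hx with ⟨i, hi, hxi⟩
    have hilen : res.toNat + i < rest.length := by
      have := rest.length_drop (i := res.toNat)
      omega
    have : (rest.drop res.toNat)[i] = rest[res.toNat + i] := List.getElem_drop
    rw [this] at hxi
    have := hsuf (res.toNat + i) (by omega) hilen
    rw [List.getD_eq_getElem rest 0 hilen] at this
    omega
  refine eq_of_perm_of_pairwise_ge ?_ ?_ ?_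
  · refine List.perm_middle.trans ?_
    rw [List.take_append_drop]
    exact (PySem.List.sorted_perm (d :: rest) (fun x : Int => x) true).symm
  · rw [List.pairwise_append]
    refine ⟨List.Pairwise.sublist (List.take_sublist _ _) hrest, ?_, ?_⟩
    · refine List.pairwise_cons.mpr ⟨?_, List.Pairwise.sublist (List.drop_sublist _ _) hrest⟩
      intro y hy
      have := hx_drop y hy
      omega
    · intro x hx y hy
      have hdx := hx_take x hx
      rcases List.mem_cons.mp hy with rfl | hy'
      · exact hdx
      · have := hx_drop y hy'
        omega
  · simpa using PySem.List.sorted_pairwise_rev (d :: rest) (fun x : Int => x)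

theorem loopA_eq_loopB (n : Nat) :
    ∀ (l : List Int), l.length ≤ n → ∀ (r : Int),
      maxDaysToWorkLoop n l r = maxDaysToWorkLoopB n (PySem.List.sorted l (fun x => x) true) r := by
  induction n with
  | zero => intro l hl r; rfl
  | succ n ih =>
      intro l hl r
      cases h : PySem.List.sorted l (fun x => x) true with
      | nil => simp only [maxDaysToWorkLoop, maxDaysToWorkLoopB, h]
      | cons a t =>
        cases t with
        | nil => simp only [maxDaysToWorkLoop, maxDaysToWorkLoopB, h]
        | cons b rest =>
          have hlen : l.length = rest.length + 2 := by
            have := PySem.List.length_sorted l (fun x : Int => x) true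
            rw [h] at this
            simpa using this.symm
          have hrest : rest.Pairwise (fun a b : Int => b ≤ a) := by
            have := PySem.List.sorted_pairwise_rev l (fun x : Int => x)
            rw [h] at this
            simpa using (List.pairwise_cons.mp (List.pairwise_cons.mp this).2).2
          have hle : ((a - b) :: rest).length ≤ n := by
            simp only [List.length_cons]; omega
          simp only [maxDaysToWorkLoop, maxDaysToWorkLoopB, h]
          have hlenrest : PySem.List.len rest = (rest.length : Int) := by
            simp [PySem.List.len_eq]
          rw [hlenrest]
          obtain ⟨hb0, hblen, hbpre, hbsuf⟩ :=
            bisect_boundary rest (a - b) hrest (rest.length + 1) 0 rest.length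
              le_rfl (by omega) le_rfl (by omega)
              (by intro j hj; omega)
              (by intro j hj hjl; omega)
          rw [ih _ hle, insert_at_boundary_eq_sorted rest (a - b) _ hrest hb0 hblen hbpre hbsuf]

-- ===== VERDICT (by name: the statement is the Claim_ definition above) =====
theorem maxDaysToWork_spec : Claim_equal_maxDaysToWork := by
  intro countTown _
  unfold Spec_maxDaysToWork maxDaysToWork maxDaysToWork_alt
  exact loopA_eq_loopB countTown.length countTown le_rfl 0
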